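-- pv_equiv track=rewrite | github.com/9MNickHazard/Eldgard | character_and_monsters.py | get_modifier
-- ===== SOURCE A (Python) =====
-- def get_modifier(stat):
--     modifiers = {
--         range(1, 2): -5,
--         range(2, 4): -4,
--         range(4, 6): -3,
--         range(6, 8): -2,
--         range(8, 10): -1,
--         range(10, 12): 0,
--         range(12, 14): 1,
--         range(14, 16): 2,
--         range(16, 18): 3,
--         range(18, 20): 4,
--         range(20, 22): 5,
--         range(22, 24): 6,
--         range(24, 26): 7,
--         range(26, 28): 8,
--         range(28, 30): 9,
--         range(30, 31): 10
--         }
--     for stat_range, modifier in modifiers.items():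
--         if stat in stat_range:
--             return modifier
-- ===== SOURCE B (Python) =====
-- def get_modifier(stat):
--     if 1 <= stat <= 30:
--         return (stat - 10) // 2
--     return None
-- ===== Notes on version B (the rewrite author's own statement) =====
-- stated objective: simpler
-- what changed: Replaced the dict of ranges and linear scan with a bounds check and the closed form (stat - 10) // 2.
import Mathlib
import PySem

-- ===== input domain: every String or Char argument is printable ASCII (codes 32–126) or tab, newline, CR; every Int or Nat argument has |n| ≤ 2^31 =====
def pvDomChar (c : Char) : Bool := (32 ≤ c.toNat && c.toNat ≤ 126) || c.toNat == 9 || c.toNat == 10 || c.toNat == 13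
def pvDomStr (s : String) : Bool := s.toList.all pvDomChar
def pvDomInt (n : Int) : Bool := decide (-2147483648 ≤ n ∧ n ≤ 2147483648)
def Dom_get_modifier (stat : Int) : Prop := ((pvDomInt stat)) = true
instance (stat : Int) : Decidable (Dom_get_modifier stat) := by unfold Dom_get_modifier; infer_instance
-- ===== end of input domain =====

-- B replaces A's 16-range table scan with a bounds check and the closed form (stat - 10) // 2 (simpler).

-- ===== PORT A =====
-- the dict keyed by ranges, as an association list of ((lo, hi), modifier): range(lo, hi) ↦ modifier
def getModifierTable : List ((Int × Int) × Int) :=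
  [((1, 2), -5), ((2, 4), -4), ((4, 6), -3), ((6, 8), -2), ((8, 10), -1),
   ((10, 12), 0), ((12, 14), 1), ((14, 16), 2), ((16, 18), 3), ((18, 20), 4),
   ((20, 22), 5), ((22, 24), 6), ((24, 26), 7), ((26, 28), 8), ((28, 30), 9), ((30, 31), 10)]

-- the for-loop over modifiers.items(): return the first modifier whose range contains stat
def getModifierLoop (stat : Int) : List ((Int × Int) × Int) → Option Int
  | [] => none
  | ((lo, hi), m) :: rest =>
      if lo ≤ stat ∧ stat < hi then some m else getModifierLoop stat rest

def get_modifier (stat : Int) : Option Int := getModifierLoop stat getModifierTable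

-- ===== PORT B =====
def get_modifier_alt (stat : Int) : Option Int :=
  if 1 ≤ stat ∧ stat ≤ 30 then some (PySem.Int.floordiv (stat - 10) 2) else none

-- ===== PRECONDITION & SPEC =====
def Spec_get_modifier (stat : Int) (out : Option Int) : Prop := out = get_modifier_alt stat
instance (stat : Int) (out : Option Int) : Decidable (Spec_get_modifier stat out) := by unfold Spec_get_modifier; infer_instance

-- ===== CLAIM (what is proved, stated in full; the proofs are below) =====
def Claim_equal_get_modifier : Prop := ∀ (stat : Int), Dom_get_modifier stat → Spec_get_modifier stat (get_modifier stat)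

-- ===== LEMMAS AND PROOFS =====

-- ===== VERDICT (by name: the statement is the Claim_ definition above) =====
set_option maxHeartbeats 1000000 in
theorem get_modifier_spec : Claim_equal_get_modifier := by
  intro stat _
  unfold Spec_get_modifier
  by_cases h : 1 ≤ stat ∧ stat ≤ 30
  · obtain ⟨h1, h30⟩ := h
    interval_cases stat <;> rfl
  · have hb : get_modifier_alt stat = none := by
      unfold get_modifier_alt; rw [if_neg]; omega
    have ha : get_modifier stat = none := by
      unfold get_modifier getModifierTable
      rw [getModifierLoop]; rw [if_neg (by omega)]
      rw [getModifierLoop]; rw [if_neg (by omega)]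
      rw [getModifierLoop]; rw [if_neg (by omega)]
      rw [getModifierLoop]; rw [if_neg (by omega)]
      rw [getModifierLoop]; rw [if_neg (by omega)]
      rw [getModifierLoop]; rw [if_neg (by omega)]
      rw [getModifierLoop]; rw [if_neg (by omega)]
      rw [getModifierLoop]; rw [if_neg (by omega)]
      rw [getModifierLoop]; rw [if_neg (by omega)]
      rw [getModifierLoop]; rw [if_neg (by omega)]
      rw [getModifierLoop]; rw [if_neg (by omega)]
      rw [getModifierLoop]; rw [if_neg (by omega)]
      rw [getModifierLoop]; rw [if_neg (by omega)]
      rw [getModifierLoop]; rw [if_neg (by omega)]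
      rw [getModifierLoop]; rw [if_neg (by omega)]
      rw [getModifierLoop]; rw [if_neg (by omega)]
      rfl
    rw [ha, hb]
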